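-- pv_equiv track=rewrite | github.com/SJ1115/MMMM | src/task/sofc.py | __mix_fold
-- ===== SOURCE A (Python) =====
-- def __mix_fold(x_1, y_1, x_2, y_2, fold:int):
--     assert fold in (0, 1, 2, 3, 4, 5), "'fold' should be an int among [0,5], 0 means no fold(default)."
--
--     if fold == 0:
--         return x_1, y_1, x_2, y_2
--
--     ## else:
--     res = fold-1
--     x_cat = x_1 + x_2
--     y_cat = y_1 + y_2
--
--     x_a, y_a, x_b, y_b = [], [], [], []
--     for i, (x, y) in enumerate(zip(x_cat, y_cat)):
--         if i % 5 == res: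
--             x_b.append(x)
--             y_b.append(y)
--         else:
--             x_a.append(x)
--             y_a.append(y)
--
--     return x_a, y_a, x_b, y_b
-- ===== SOURCE B (Python) =====
-- def __mix_fold(x_1, y_1, x_2, y_2, fold: int):
--     assert fold in (0, 1, 2, 3, 4, 5), "'fold' should be an int among [0,5], 0 means no fold(default)."
--     if fold == 0:
--         return x_1, y_1, x_2, y_2
--     res = fold - 1
--     x_cat = x_1 + x_2
--     y_cat = y_1 + y_2
--     n = min(len(x_cat), len(y_cat))
--     x_cat = x_cat[:n]
--     y_cat = y_cat[:n]
--     x_b = x_cat[res::5]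
--     y_b = y_cat[res::5]
--     x_a = x_cat[:]
--     del x_a[res::5]
--     y_a = y_cat[:]
--     del y_a[res::5]
--     return x_a, y_a, x_b, y_b
-- ===== Notes on version B (the rewrite author's own statement) =====
-- stated objective: idiomatic
-- what changed: Replaces A's single enumerate(zip(...)) loop that appends element-by-element into four accumulators with truncation to the common length followed by strided slicing x_cat[res::5] for group b and slice deletion del x_a[res::5] for the complement.
import Mathlib
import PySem

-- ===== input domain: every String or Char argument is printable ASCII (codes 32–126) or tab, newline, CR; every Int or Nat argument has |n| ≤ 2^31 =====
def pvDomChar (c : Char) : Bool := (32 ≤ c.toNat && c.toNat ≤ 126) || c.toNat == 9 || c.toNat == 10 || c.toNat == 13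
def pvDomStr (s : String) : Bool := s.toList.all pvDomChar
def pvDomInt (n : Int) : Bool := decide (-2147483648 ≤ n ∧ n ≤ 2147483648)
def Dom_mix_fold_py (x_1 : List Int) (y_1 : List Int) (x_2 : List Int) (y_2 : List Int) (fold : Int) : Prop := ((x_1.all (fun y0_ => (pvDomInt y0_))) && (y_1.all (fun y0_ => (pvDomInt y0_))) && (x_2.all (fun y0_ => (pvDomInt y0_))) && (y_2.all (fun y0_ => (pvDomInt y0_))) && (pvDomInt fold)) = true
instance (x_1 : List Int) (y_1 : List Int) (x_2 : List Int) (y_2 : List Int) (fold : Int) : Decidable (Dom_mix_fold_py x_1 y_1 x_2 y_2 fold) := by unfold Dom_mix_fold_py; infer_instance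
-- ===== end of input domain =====

-- B replaces A's enumerate-zip loop with truncation to the common length followed by
-- strided slicing (group b) and slice deletion (group a); objective: idiomatic.

-- ===== PORT A =====
-- the loop body of A (append to one of the four accumulators by i % 5 == res)
def pvMixStep (res : Int) (s : List Int × List Int × List Int × List Int)
    (p : Int × Int × Int) : List Int × List Int × List Int × List Int :=
  if PySem.Int.mod p.1 5 == res then (s.1, s.2.1, s.2.2.1 ++ [p.2.1], s.2.2.2 ++ [p.2.2])
  else (s.1 ++ [p.2.1], s.2.1 ++ [p.2.2], s.2.2.1, s.2.2.2)

def mix_fold_py (x_1 : List Int) (y_1 : List Int) (x_2 : List Int) (y_2 : List Int) (fold : Int) : List Int × List Int × List Int × List Int :=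
  if fold == 0 then (x_1, y_1, x_2, y_2)
  else
    let res := fold - 1
    let x_cat := x_1 ++ x_2
    let y_cat := y_1 ++ y_2
    let st := (PySem.List.enumerate (x_cat.zip y_cat)).foldl (pvMixStep res) ([], [], [], [])
    (st.1, st.2.1, st.2.2.1, st.2.2.2)

-- ===== PORT B =====
-- xs[res::5] for 0 ≤ res < 5 (exact on that range, which Pre_ guarantees): indices ≡ res (mod 5)
def pvStride5 (res : Int) (xs : List Int) : List Int :=
  (PySem.List.enumerate xs).filterMap (fun p => if PySem.Int.mod p.1 5 == res then some p.2 else none)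

-- del xs[res::5] for 0 ≤ res < 5 (exact on that range): keep indices ≢ res (mod 5)
def pvDelStride5 (res : Int) (xs : List Int) : List Int :=
  (PySem.List.enumerate xs).filterMap (fun p => if PySem.Int.mod p.1 5 == res then none else some p.2)

def mix_fold_py_alt (x_1 : List Int) (y_1 : List Int) (x_2 : List Int) (y_2 : List Int) (fold : Int) : List Int × List Int × List Int × List Int :=
  if fold == 0 then (x_1, y_1, x_2, y_2)
  else
    let res := fold - 1
    let x_cat := x_1 ++ x_2
    let y_cat := y_1 ++ y_2
    let n := min x_cat.length y_cat.length
    let xc := x_cat.take n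
    let yc := y_cat.take n
    (pvDelStride5 res xc, pvDelStride5 res yc, pvStride5 res xc, pvStride5 res yc)

-- ===== PRECONDITION & SPEC =====
-- Pre_ is exactly A's assert: fold must be one of 0,1,2,3,4,5 (else AssertionError)
def Pre_mix_fold_py (x_1 : List Int) (y_1 : List Int) (x_2 : List Int) (y_2 : List Int) (fold : Int) : Prop :=
  0 ≤ fold ∧ fold ≤ 5
instance (x_1 : List Int) (y_1 : List Int) (x_2 : List Int) (y_2 : List Int) (fold : Int) : Decidable (Pre_mix_fold_py x_1 y_1 x_2 y_2 fold) := by unfold Pre_mix_fold_py; infer_instance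
def pvWitness_mix_fold_py : List Int × List Int × List Int × List Int × Int := ([1, 2, 3], [4, 5, 6], [7, 8], [9, 10], 2)

def Spec_mix_fold_py (x_1 : List Int) (y_1 : List Int) (x_2 : List Int) (y_2 : List Int) (fold : Int) (out : List Int × List Int × List Int × List Int) : Prop := out = mix_fold_py_alt x_1 y_1 x_2 y_2 fold
instance (x_1 : List Int) (y_1 : List Int) (x_2 : List Int) (y_2 : List Int) (fold : Int) (out : List Int × List Int × List Int × List Int) : Decidable (Spec_mix_fold_py x_1 y_1 x_2 y_2 fold out) := by unfold Spec_mix_fold_py; infer_instance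

-- ===== CLAIM (what is proved, stated in full; the proofs are below) =====
def Claim_equal_mix_fold_py : Prop := ∀ (x_1 : List Int) (y_1 : List Int) (x_2 : List Int) (y_2 : List Int) (fold : Int), Dom_mix_fold_py x_1 y_1 x_2 y_2 fold → Pre_mix_fold_py x_1 y_1 x_2 y_2 fold → Spec_mix_fold_py x_1 y_1 x_2 y_2 fold (mix_fold_py x_1 y_1 x_2 y_2 fold)

-- ===== LEMMAS AND PROOFS =====

-- (u.zip v).take n distributes over take on both sides
theorem pv_take_zip (u : List Int) : ∀ (v : List Int) (n : Nat),
    (u.zip v).take n = (u.take n).zip (v.take n) := by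
  induction u with
  | nil => intro v n; simp
  | cons x xs ih =>
      intro v n
      cases v with
      | nil => simp
      | cons y ys =>
          cases n with
          | zero => simp
          | succ m => simp [ih ys m]

-- A's loop, started from any accumulators, appends exactly the two filterMaps B computes.
theorem pvMix_loop (res : Int) (l : List (Int × Int)) (s : Int)
    (a b c d : List Int) :
    (PySem.List.enumerate l s).foldl (pvMixStep res) (a, b, c, d) =
      (a ++ (PySem.List.enumerate l s).filterMap
              (fun p => if PySem.Int.mod p.1 5 == res then none else some p.2.1),
       b ++ (PySem.List.enumerate l s).filterMap
              (fun p => if PySem.Int.mod p.1 5 == res then none else some p.2.2),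
       c ++ (PySem.List.enumerate l s).filterMap
              (fun p => if PySem.Int.mod p.1 5 == res then some p.2.1 else none),
       d ++ (PySem.List.enumerate l s).filterMap
              (fun p => if PySem.Int.mod p.1 5 == res then some p.2.2 else none)) := by
  induction l generalizing s a b c d with
  | nil => simp [PySem.List.enumerate_nil]
  | cons hd tl ih =>
      rw [PySem.List.enumerate_cons]
      simp only [List.foldl_cons, pvMixStep]
      split_ifs with h
      · have h' : s % 5 = res := by simpa using h
        simp [List.filterMap_cons, h', ih]
      · have h' : ¬ s % 5 = res := by simpa using h
        simp [List.filterMap_cons, h', ih, List.append_assoc]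

-- filterMap over the enumerated zip of equal-length lists, seen through a projection.
theorem pvZip_proj (g : Int → Int → Option Int) (u : List Int) :
    ∀ (v : List Int), u.length = v.length → ∀ (s : Int),
    (PySem.List.enumerate (u.zip v) s).filterMap (fun p => g p.1 p.2.1) =
      (PySem.List.enumerate u s).filterMap (fun p => g p.1 p.2) := by
  induction u with
  | nil => intro v _ s; simp [PySem.List.enumerate_nil]
  | cons x xs ih =>
      intro v hv s
      cases v with
      | nil => simp at hv
      | cons y ys =>
          simp only [List.zip_cons_cons, PySem.List.enumerate_cons, List.filterMap_cons]
          have := ih ys (by simpa using hv) (s + 1)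
          cases g s x <;> simp [this]

theorem pvZip_proj2 (g : Int → Int → Option Int) (u : List Int) :
    ∀ (v : List Int), u.length = v.length → ∀ (s : Int),
    (PySem.List.enumerate (u.zip v) s).filterMap (fun p => g p.1 p.2.2) =
      (PySem.List.enumerate v s).filterMap (fun p => g p.1 p.2) := by
  induction u with
  | nil =>
      intro v hv s
      cases v with
      | nil => simp [PySem.List.enumerate_nil]
      | cons y ys => simp at hv
  | cons x xs ih =>
      intro v hv s
      cases v with
      | nil => simp at hv
      | cons y ys =>
          simp only [List.zip_cons_cons, PySem.List.enumerate_cons, List.filterMap_cons]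
          have := ih ys (by simpa using hv) (s + 1)
          cases g s y <;> simp [this]

-- ===== VERDICT (by name: the statement is the Claim_ definition above) =====
theorem mix_fold_py_spec : Claim_equal_mix_fold_py := by
  intro x_1 y_1 x_2 y_2 fold _ _
  unfold Spec_mix_fold_py mix_fold_py mix_fold_py_alt
  by_cases h0 : fold == 0
  · simp [h0]
  · simp only [h0]
    set res := fold - 1
    set x_cat := x_1 ++ x_2 with hx
    set y_cat := y_1 ++ y_2 with hy
    set n := min x_cat.length y_cat.length with hn
    have hzip : x_cat.zip y_cat = (x_cat.take n).zip (y_cat.take n) := by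
      rw [← pv_take_zip, List.take_of_length_le (by simp [hn, List.length_zip])]
    have hlx : (x_cat.take n).length = n := by
      simp [hn]
    have hly : (y_cat.take n).length = n := by
      simp [hn]
    rw [pvMix_loop, hzip]
    refine Prod.ext ?_ (Prod.ext ?_ (Prod.ext ?_ ?_)) <;>
      simp only [List.nil_append, pvDelStride5, pvStride5]
    · exact pvZip_proj (fun i x => if PySem.Int.mod i 5 == res then none else some x)
        _ _ (hlx.trans hly.symm) 0
    · exact pvZip_proj2 (fun i x => if PySem.Int.mod i 5 == res then none else some x)
        _ _ (hlx.trans hly.symm) 0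
    · exact pvZip_proj (fun i x => if PySem.Int.mod i 5 == res then some x else none)
        _ _ (hlx.trans hly.symm) 0
    · exact pvZip_proj2 (fun i x => if PySem.Int.mod i 5 == res then some x else none)
        _ _ (hlx.trans hly.symm) 0
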